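-- pv_equiv track=rewrite | github.com/Micheleww/scc2 | projects/quantsys/services/a2a_hub/main.py | get_required_permission
-- ===== SOURCE A (Python) =====
-- ENDPOINT_PERMISSIONS = {
--     # Task endpoints
--     ("/api/task/create", "POST"): "create",
--     ("/api/task/status", "GET"): "read_all",
--     ("/api/task/result", "POST"): "report_result",
--     ("/api/task/next", "GET"): "read_all",
--     ("/api/task/heartbeat", "POST"): "read_all",
--     ("/api/task/routing", "POST"): "read_all",
--     # DLQ endpoints
--     ("/api/dlq/list", "GET"): "read_all",
--     ("/api/dlq", "GET"): "read_all",
--     ("/api/dlq/replay", "POST"): "replay_dlq",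
--     ("/api/dlq/<dlq_id>", "GET"): "read_all",
--     ("/api/dlq/task/<task_code>", "GET"): "read_all",
--     # Agent endpoints
--     ("/api/agent/register", "POST"): "assign",
--     ("/api/agent/list", "GET"): "read_all",
--     ("/api/agent/<agent_id>", "GET"): "read_all",
--     ("/api/agent/<agent_id>", "PUT"): "assign",
--     ("/api/agent/<agent_id>", "DELETE"): "assign",
-- }
--
-- def get_required_permission(endpoint, method):
--     """
--     Get the required permission for a given endpoint and method
--     """
--     # Check exact match first
--     if (endpoint, method) in ENDPOINT_PERMISSIONS:
--         return ENDPOINT_PERMISSIONS[(endpoint, method)]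
--
--     # Check for wildcard endpoints (like /api/agent/<agent_id>)
--     for (key_endpoint, key_method), permission in ENDPOINT_PERMISSIONS.items():
--         if "<" in key_endpoint and method == key_method:
--             # Extract base path without parameter
--             base_key = key_endpoint.split("/<")[0] + "/"
--             base_endpoint = endpoint.split("/")[0] + "/" + "/".join(endpoint.split("/")[1:-1]) + "/"
--             if base_key == base_endpoint:
--                 return permission
--
--     # Default to read_all for unknown endpoints
--     return "read_all"
-- ===== SOURCE B (Python) =====
-- ENDPOINT_PERMISSIONS = {
--     ("/api/task/create", "POST"): "create",
--     ("/api/task/status", "GET"): "read_all",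
--     ("/api/task/result", "POST"): "report_result",
--     ("/api/task/next", "GET"): "read_all",
--     ("/api/task/heartbeat", "POST"): "read_all",
--     ("/api/task/routing", "POST"): "read_all",
--     ("/api/dlq/list", "GET"): "read_all",
--     ("/api/dlq", "GET"): "read_all",
--     ("/api/dlq/replay", "POST"): "replay_dlq",
--     ("/api/dlq/<dlq_id>", "GET"): "read_all",
--     ("/api/dlq/task/<task_code>", "GET"): "read_all",
--     ("/api/agent/register", "POST"): "assign",
--     ("/api/agent/list", "GET"): "read_all",
--     ("/api/agent/<agent_id>", "GET"): "read_all",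
--     ("/api/agent/<agent_id>", "PUT"): "assign",
--     ("/api/agent/<agent_id>", "DELETE"): "assign",
-- }
--
-- def _matches(pattern, parts):
--     # classic router rule: same number of segments, '<...>' segments match anything
--     if len(pattern) != len(parts):
--         return False
--     return all(p.startswith("<") or p == q for p, q in zip(pattern, parts))
--
-- def get_required_permission(endpoint, method):
--     # uniform first-match route resolution by per-segment comparison: no exact-lookup
--     # phase and no base-path string reconstruction
--     parts = endpoint.split("/")
--     for (key_endpoint, key_method), permission in ENDPOINT_PERMISSIONS.items():
--         if method == key_method and _matches(key_endpoint.split("/"), parts):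
--             return permission
--     return "read_all"
-- ===== Notes on version B (the rewrite author's own statement) =====
-- stated objective: alternative
-- what changed: Replaces A's two-phase resolution (exact dict lookup, then a scan that reconstructs a base-path string from both the key and the endpoint and compares the strings) with a single uniform first-match route scan that splits each route pattern into segments and matches the endpoint per segment, treating '<...>' segments as wildcards; no exact-lookup phase and no base-path string surgery remain.
import Mathlib
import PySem

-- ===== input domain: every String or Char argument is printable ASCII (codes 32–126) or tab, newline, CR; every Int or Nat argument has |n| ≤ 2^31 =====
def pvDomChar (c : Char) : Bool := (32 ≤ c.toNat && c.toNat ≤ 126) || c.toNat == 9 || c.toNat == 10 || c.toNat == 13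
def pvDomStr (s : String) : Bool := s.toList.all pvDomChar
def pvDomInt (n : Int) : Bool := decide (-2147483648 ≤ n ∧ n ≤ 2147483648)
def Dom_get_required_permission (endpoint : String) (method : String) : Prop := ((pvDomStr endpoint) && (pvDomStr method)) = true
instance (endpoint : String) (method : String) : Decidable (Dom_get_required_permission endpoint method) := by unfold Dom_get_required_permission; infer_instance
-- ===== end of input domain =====

-- B replaces A's two-phase resolution (exact dict lookup, then a scan comparing a
-- reconstructed base-path string) with a single uniform first-match route scan that
-- matches the endpoint against each route pattern segment by segment, '<...>'
-- segments acting as wildcards (alternative).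

-- ===== PORT A =====
def pvEntries : List ((String × String) × String) :=
  [ (("/api/task/create", "POST"), "create"),
    (("/api/task/status", "GET"), "read_all"),
    (("/api/task/result", "POST"), "report_result"),
    (("/api/task/next", "GET"), "read_all"),
    (("/api/task/heartbeat", "POST"), "read_all"),
    (("/api/task/routing", "POST"), "read_all"),
    (("/api/dlq/list", "GET"), "read_all"),
    (("/api/dlq", "GET"), "read_all"),
    (("/api/dlq/replay", "POST"), "replay_dlq"),
    (("/api/dlq/<dlq_id>", "GET"), "read_all"),
    (("/api/dlq/task/<task_code>", "GET"), "read_all"),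
    (("/api/agent/register", "POST"), "assign"),
    (("/api/agent/list", "GET"), "read_all"),
    (("/api/agent/<agent_id>", "GET"), "read_all"),
    (("/api/agent/<agent_id>", "PUT"), "assign"),
    (("/api/agent/<agent_id>", "DELETE"), "assign") ]

def pvEndpointPermissions : PySem.Dict (String × String) String := PySem.Dict.mk pvEntries

-- endpoint.split("/")[0] + "/" + "/".join(endpoint.split("/")[1:-1]) + "/"
-- ('[0]' is exact as headD: split with nonempty sep returns some nonempty list, so getD/headD never fire)
def pvBaseEndpoint (endpoint : String) : String :=
  ((PySem.Str.split? endpoint "/").getD []).headD "" ++ "/" ++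
    PySem.Str.join "/" (PySem.List.slice ((PySem.Str.split? endpoint "/").getD []) (some 1) (some (-1))) ++ "/"

-- the for-loop over ENDPOINT_PERMISSIONS.items()
def pvScanA (endpoint : String) (method : String) : List ((String × String) × String) → String
  | [] => "read_all"
  | ((ke, km), perm) :: rest =>
    if PySem.Str.isIn "<" ke && method == km then
      if ((PySem.Str.split? ke "/<").getD []).headD "" ++ "/" == pvBaseEndpoint endpoint then perm
      else pvScanA endpoint method rest
    else pvScanA endpoint method rest

def get_required_permission (endpoint : String) (method : String) : String :=
  match pvEndpointPermissions.get? (endpoint, method) with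
  | some p => p
  | none => pvScanA endpoint method pvEndpointPermissions.items

-- ===== PORT B =====
-- classic router rule: same number of segments, '<...>' segments match anything
def pvMatches (pattern : List String) (parts : List String) : Bool :=
  if pattern.length != parts.length then false
  else (pattern.zip parts).all (fun pq => PySem.Str.startswith pq.1 "<" || pq.1 == pq.2)

-- the for-loop over ENDPOINT_PERMISSIONS.items()
def pvScanAlt (parts : List String) (method : String) : List ((String × String) × String) → String
  | [] => "read_all"
  | ((ke, km), perm) :: rest =>
    if method == km && pvMatches ((PySem.Str.split? ke "/").getD []) parts then perm
    else pvScanAlt parts method rest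

def get_required_permission_alt (endpoint : String) (method : String) : String :=
  pvScanAlt ((PySem.Str.split? endpoint "/").getD []) method pvEntries

-- ===== PRECONDITION & SPEC =====
def Spec_get_required_permission (endpoint : String) (method : String) (out : String) : Prop := out = get_required_permission_alt endpoint method
instance (endpoint : String) (method : String) (out : String) : Decidable (Spec_get_required_permission endpoint method out) := by unfold Spec_get_required_permission; infer_instance

-- ===== CLAIM (what is proved, stated in full; the proofs are below) =====
def Claim_equal_get_required_permission : Prop := ∀ (endpoint : String) (method : String), Dom_get_required_permission endpoint method → Spec_get_required_permission endpoint method (get_required_permission endpoint method)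

-- ===== LEMMAS AND PROOFS =====

-- ---- split("/") theory on the char side ----

-- simple structural model of CPython's str.split with a one-character separator
def pvAux : List Char → List Char → List (List Char)
  | [], cur => [cur.reverse]
  | c :: rest, cur => if c = '/' then cur.reverse :: pvAux rest [] else pvAux rest (c :: cur)

theorem pvGo_eq (fuel : Nat) (l cur : List Char) (acc : List (List Char)) (h : l.length ≤ fuel) :
    PySem.Chars.splitOn.go ['/'] fuel l cur acc = acc.reverse ++ pvAux l cur := by
  induction fuel generalizing l cur acc with
  | zero =>
    have : l = [] := by cases l <;> simp_all
    subst this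
    simp [PySem.Chars.splitOn.go, pvAux]
  | succ n ih =>
    cases l with
    | nil => simp [PySem.Chars.splitOn.go, pvAux]
    | cons c rest =>
      rw [PySem.Chars.splitOn.go]
      by_cases hc : c = '/'
      · subst hc
        have hpre : List.isPrefixOf ['/'] ('/' :: rest) = true := by simp [List.isPrefixOf]
        simp only [hpre, if_pos]
        rw [ih _ _ _ (by simpa using Nat.le_of_succ_le_succ (by simpa using h))]
        simp [pvAux]
      · have hpre : List.isPrefixOf ['/'] (c :: rest) = false := by
          simp [List.isPrefixOf]
          exact fun h => hc h.symm
        simp only [hpre]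
        rw [if_neg (by simp)]
        rw [ih _ _ _ (by simpa using Nat.le_of_succ_le_succ (by simpa using h))]
        simp only [pvAux, if_neg hc]

theorem pvSplitOn_eq (s : List Char) : PySem.Chars.splitOn s ['/'] = pvAux s [] := by
  rw [PySem.Chars.splitOn, pvGo_eq _ _ _ _ (by omega)]; rfl

theorem pvAux_ne_nil (l cur : List Char) : pvAux l cur ≠ [] := by
  induction l generalizing cur with
  | nil => simp [pvAux]
  | cons c rest ih =>
    by_cases hc : c = '/' <;> simp [pvAux, hc, ih]

theorem pvAux_sf (l cur : List Char) (hc : '/' ∉ cur) : ∀ p ∈ pvAux l cur, '/' ∉ p := by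
  induction l generalizing cur with
  | nil => simpa [pvAux] using hc
  | cons c rest ih =>
    by_cases h : c = '/'
    · subst h
      intro p hp
      rw [pvAux, if_pos rfl] at hp
      rcases List.mem_cons.mp hp with hp | hp
      · subst hp; simpa using hc
      · exact ih [] (by simp) p hp
    · intro p hp
      rw [pvAux, if_neg h] at hp
      refine ih (c :: cur) ?_ p hp
      simp only [List.mem_cons, not_or]
      exact ⟨fun hh => h hh.symm, hc⟩

theorem pvAux_join (l cur : List Char) :
    List.intercalate ['/'] (pvAux l cur) = cur.reverse ++ l := by
  induction l generalizing cur with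
  | nil => simp [pvAux, List.intercalate]
  | cons c rest ih =>
    by_cases h : c = '/'
    · subst h
      have hne := pvAux_ne_nil rest []
      rw [pvAux, if_pos rfl]
      cases haux : pvAux rest [] with
      | nil => exact absurd haux hne
      | cons q qs =>
        have : List.intercalate ['/'] (cur.reverse :: q :: qs)
            = cur.reverse ++ ['/'] ++ List.intercalate ['/'] (q :: qs) := by
          simpa using PySem.Chars.join_cons_cons ['/'] cur.reverse q (qs)
        rw [this, ← haux, ih []]
        simp
    · rw [pvAux]
      simp only [if_neg h]
      rw [ih (c :: cur)]
      simp

-- the char-level split of an endpoint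
def pvPC (e : String) : List (List Char) := PySem.Chars.splitOn e.toList ['/']
-- the string-level split of an endpoint, as both ports compute it
def pvParts (e : String) : List String := (PySem.Str.split? e "/").getD []

theorem pvParts_eq (e : String) : pvParts e = (pvPC e).map String.ofList := by
  simp [pvParts, pvPC, PySem.Str.split?, PySem.Chars.split?]

theorem pvPC_map (e : String) : (pvParts e).map String.toList = pvPC e := by
  rw [pvParts_eq]
  simp [List.map_map, Function.comp_def]

theorem pvPC_ne_nil (e : String) : pvPC e ≠ [] := by
  rw [pvPC, pvSplitOn_eq]; exact pvAux_ne_nil _ _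

theorem pvPC_sf (e : String) : ∀ p ∈ pvPC e, '/' ∉ p := by
  rw [pvPC, pvSplitOn_eq]; exact pvAux_sf _ _ (by simp)

theorem pvPC_join (e : String) : List.intercalate ['/'] (pvPC e) = e.toList := by
  rw [pvPC, pvSplitOn_eq, pvAux_join]; rfl

theorem pvSplit_inj (e k : String) (h : pvParts e = pvParts k) : e = k := by
  have h2 : pvPC e = pvPC k := by
    rw [← pvPC_map, ← pvPC_map, h]
  have := pvPC_join e
  rw [h2, pvPC_join] at this
  exact String.toList_inj.mp this.symm

-- ---- the two matching rules coincide ----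

theorem pvMatches_nil_nil : pvMatches [] [] = true := by simp [pvMatches]
theorem pvMatches_nil_cons (q : String) (qs : List String) : pvMatches [] (q :: qs) = false := by
  simp [pvMatches]
theorem pvMatches_cons_nil (p : String) (ps : List String) : pvMatches (p :: ps) [] = false := by
  simp [pvMatches]
theorem pvMatches_cons (p q : String) (ps qs : List String) :
    pvMatches (p :: ps) (q :: qs)
      = ((PySem.Str.startswith p "<" || p == q) && pvMatches ps qs) := by
  simp only [pvMatches, List.length_cons, List.zip_cons_cons, List.all_cons]
  by_cases h : ps.length = qs.length
  · simp [h]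
  · simp [h, bne_iff_ne]
theorem pvMatches_exact (pat parts : List String)
    (hp : ∀ p ∈ pat, PySem.Str.startswith p "<" = false) :
    pvMatches pat parts = true ↔ parts = pat := by
  induction pat generalizing parts with
  | nil =>
    cases parts with
    | nil => simp [pvMatches_nil_nil]
    | cons q qs => simp [pvMatches_nil_cons]
  | cons p ps ih =>
    cases parts with
    | nil => simp [pvMatches_cons_nil]
    | cons q qs =>
      rw [pvMatches_cons]
      have hh := hp p (by simp)
      rw [hh]
      simp only [Bool.false_or, Bool.and_eq_true, beq_iff_eq]
      rw [ih qs (fun x hx => hp x (by simp [hx]))]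
      constructor
      · rintro ⟨h1, h2⟩; simp [h1, h2]
      · rintro h; injection h with h1 h2; exact ⟨h1.symm, h2⟩

theorem pvMatches_wild (Q : List String) (w : String) (parts : List String)
    (hw : PySem.Str.startswith w "<" = true)
    (hq : ∀ p ∈ Q, PySem.Str.startswith p "<" = false) :
    pvMatches (Q ++ [w]) parts = true ↔ ∃ x, parts = Q ++ [x] := by
  induction Q generalizing parts with
  | nil =>
    cases parts with
    | nil => simp [pvMatches_cons_nil]
    | cons q qs =>
      cases qs with
      | nil =>
        have hw' : PySem.Chars.startswith w.toList ['<'] = true := by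
          simpa [PySem.Str.startswith] using hw
        simp [pvMatches_cons, pvMatches_nil_nil, hw']
      | cons r rs =>
        simp only [List.nil_append, pvMatches_cons, pvMatches_nil_cons, Bool.and_false]
        simp
  | cons p ps ih =>
    cases parts with
    | nil => simp [pvMatches_cons_nil]
    | cons q qs =>
      rw [List.cons_append, pvMatches_cons, hq p (by simp)]
      simp only [Bool.false_or, Bool.and_eq_true, beq_iff_eq]
      rw [ih qs (fun x hx => hq x (by simp [hx]))]
      constructor
      · rintro ⟨h1, x, h2⟩
        exact ⟨x, by simp [h1, h2]⟩
      · rintro ⟨x, hx⟩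
        injection hx with h1 h2
        exact ⟨h1.symm, x, h2⟩

theorem pvInter_two (p0 : List Char) : List.intercalate ['/'] [p0, []] = p0 ++ ['/'] := by
  have := PySem.Chars.join_cons_cons ['/'] p0 [] []
  simpa [PySem.Chars.join, PySem.Chars.join_singleton] using this
theorem pvInter_cons (p0 q : List Char) (qs : List (List Char)) :
    List.intercalate ['/'] (p0 :: q :: qs) = p0 ++ '/' :: List.intercalate ['/'] (q :: qs) := by
  have := PySem.Chars.join_cons_cons ['/'] p0 q qs
  simpa [PySem.Chars.join] using this

theorem pvInter_eq_iff (p0 : List Char) (rest Q : List (List Char))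
    (hp0 : '/' ∉ p0) (hrest : ∀ l ∈ rest, '/' ∉ l) (hQ : ∀ l ∈ Q, '/' ∉ l)
    (hQlen : 3 ≤ Q.length) :
    p0 ++ '/' :: (List.intercalate ['/'] rest.dropLast ++ ['/']) =
        List.intercalate ['/'] Q ++ ['/'] ↔ p0 :: rest.dropLast = Q := by
  have hQne : Q ≠ [] := by intro h; simp [h] at hQlen
  have hsplitQ := List.splitOn_intercalate Q '/' hQ hQne
  by_cases hdl : rest.dropLast = []
  · rw [hdl]
    constructor
    · intro h
      exfalso
      have hnil : List.intercalate ['/'] ([] : List (List Char)) = [] := rfl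
      rw [hnil] at h
      -- h : p0 ++ '/' :: ([] ++ ['/']) = intercalate Q ++ ['/']
      have h2 : (p0 ++ ['/']) ++ ['/'] = List.intercalate ['/'] Q ++ ['/'] := by
        simpa [List.append_assoc] using h
      have h3 : p0 ++ ['/'] = List.intercalate ['/'] Q := List.append_cancel_right h2
      have h4 : List.intercalate ['/'] [p0, []] = List.intercalate ['/'] Q := by
        rw [pvInter_two]; exact h3
      have h5 : [p0, []] = Q := by
        have hsf : ∀ l ∈ [p0, ([] : List Char)], '/' ∉ l := by
          intro l hl
          rcases List.mem_cons.mp hl with h' | h'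
          · rw [h']; exact hp0
          · have hl2 : l = [] := by simpa using h'
            rw [hl2]; simp
        have := List.splitOn_intercalate [p0, []] '/' hsf (by simp)
        rw [show ([('/' : Char)].intercalate [p0, []]) = [('/' : Char)].intercalate Q from h4] at this
        rw [hsplitQ] at this
        exact this.symm
      rw [← h5] at hQlen
      simp at hQlen
    · intro h
      exfalso
      rw [← h] at hQlen
      simp at hQlen
  · -- rest.dropLast nonempty
    obtain ⟨q, qs, hqs⟩ : ∃ q qs, rest.dropLast = q :: qs := by
      cases h : rest.dropLast with
      | nil => exact absurd h hdl
      | cons q qs => exact ⟨q, qs, rfl⟩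
    rw [hqs]
    constructor
    · intro h
      have h2 : List.intercalate ['/'] (p0 :: q :: qs) ++ ['/'] = List.intercalate ['/'] Q ++ ['/'] := by
        rw [pvInter_cons]
        simpa [List.append_assoc] using h
      have h3 := List.append_cancel_right h2
      have hsf : ∀ l ∈ p0 :: q :: qs, '/' ∉ l := by
        intro l hl
        rcases List.mem_cons.mp hl with hl | hl
        · subst hl; exact hp0
        · exact hrest l (List.dropLast_subset _ (hqs ▸ hl))
      have := List.splitOn_intercalate (p0 :: q :: qs) '/' hsf (by simp)
      rw [show ([('/' : Char)].intercalate (p0 :: q :: qs)) = [('/' : Char)].intercalate Q from h3, hsplitQ] at this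
      exact this.symm
    · intro h
      rw [← h, pvInter_cons]
      simp [List.append_assoc]

theorem pvSlice_one_neg_one {α : Type} (xs : List α) :
    PySem.List.slice xs (some 1) (some (-1)) = xs.tail.dropLast := by
  cases xs with
  | nil => rfl
  | cons x rest =>
    have h1 : PySem.List.clampIdx (x :: rest).length 1 = 1 := by
      simp [PySem.List.clampIdx]
    have h2 : PySem.List.clampIdx (x :: rest).length (-1) = rest.length := by
      simp
    simp only [PySem.List.slice, h1, h2]
    rw [List.dropLast_eq_take]
    simp

theorem pvBase_toList (e : String) :
    (pvBaseEndpoint e).toList =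
      (pvPC e).headD [] ++ '/' :: (List.intercalate ['/'] ((pvPC e).tail.dropLast) ++ ['/']) := by
  have hparts : pvParts e = (pvPC e).map String.ofList := pvParts_eq e
  have hhead : ((pvParts e).headD "").toList = (pvPC e).headD [] := by
    rw [hparts]
    cases pvPC e with
    | nil => simp
    | cons a t => simp
  have hslice : (PySem.List.slice (pvParts e) (some 1) (some (-1))).map String.toList
      = (pvPC e).tail.dropLast := by
    rw [pvSlice_one_neg_one, ← pvPC_map e]
    rw [List.map_dropLast, List.map_tail]
  have hjoin : (PySem.Str.join "/" (PySem.List.slice (pvParts e) (some 1) (some (-1)))).toList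
      = List.intercalate ['/'] ((pvPC e).tail.dropLast) := by
    rw [PySem.Str.join]
    rw [String.toList_ofList]
    rw [hslice]
    rfl
  show ((pvParts e).headD "" ++ "/" ++ PySem.Str.join "/" (PySem.List.slice (pvParts e) (some 1) (some (-1))) ++ "/").toList = _
  simp only [String.toList_append, hhead, hjoin]
  simp

-- A's base-path comparison against a wildcard key's base is exactly B's segment match
theorem pvBase_iff (e : String) (Qs : List String)
    (hsf : ∀ q ∈ Qs, '/' ∉ q.toList) (hlen : 3 ≤ Qs.length) :
    pvBaseEndpoint e = String.ofList (List.intercalate ['/'] (Qs.map String.toList) ++ ['/'])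
      ↔ ∃ x, pvParts e = Qs ++ [x] := by
  rw [← String.toList_inj, pvBase_toList, String.toList_ofList]
  obtain ⟨p0, rest, hpc⟩ : ∃ p0 rest, pvPC e = p0 :: rest := by
    cases h : pvPC e with
    | nil => exact absurd h (pvPC_ne_nil e)
    | cons a t => exact ⟨a, t, rfl⟩
  have hsfe := pvPC_sf e
  rw [hpc] at hsfe ⊢
  simp only [List.headD_cons, List.tail_cons]
  rw [pvInter_eq_iff p0 rest (Qs.map String.toList)
    (hsfe p0 (by simp)) (fun l hl => hsfe l (by simp [hl]))
    (by intro l hl; obtain ⟨q, hq, rfl⟩ := List.mem_map.mp hl; exact hsf q hq)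
    (by simpa using hlen)]
  constructor
  · intro h
    have hrest_ne : rest ≠ [] := by
      intro hr
      rw [hr] at h
      have := congrArg List.length h
      simp at this
      omega
    have hr2 : rest = rest.dropLast ++ [rest.getLast hrest_ne] := by
      exact (List.dropLast_append_getLast hrest_ne).symm
    refine ⟨String.ofList (rest.getLast hrest_ne), ?_⟩
    rw [pvParts_eq, hpc]
    rw [show p0 :: rest = (p0 :: rest.dropLast) ++ [rest.getLast hrest_ne] by
      simp [← hr2]]
    rw [h]
    simp only [List.map_append, List.map_map, List.map_cons, List.map_nil]
    congr 1
    · rw [show (String.ofList ∘ String.toList) = id from funext (fun s => String.ofList_toList)]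
      simp
  · rintro ⟨x, hx⟩
    rw [pvParts_eq, hpc] at hx
    have hx2 : List.map String.toList (List.map String.ofList (p0 :: rest)) = List.map String.toList (Qs ++ [x]) := by rw [hx]
    simp only [List.map_map, List.map_append, List.map_cons, List.map_nil] at hx2
    rw [show (String.toList ∘ String.ofList) = id from funext (fun s => String.toList_ofList)] at hx2
    simp only [List.map_id] at hx2
    obtain ⟨q0, Qt, hq⟩ : ∃ q0 Qt, List.map String.toList Qs = q0 :: Qt := by
      cases hq : List.map String.toList Qs with
      | nil =>
        exfalso
        have hq' : Qs = [] := by simpa using hq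
        rw [hq'] at hlen; simp at hlen
      | cons a t => exact ⟨a, t, rfl⟩
    rw [hq] at hx2
    rw [List.cons_append] at hx2
    injection hx2 with h1 h2
    subst h1
    rw [hq, h2]
    simp

-- ---- evaluation of the two ports into explicit decision chains ----

theorem pvGetD_ite (c : Prop) [Decidable c] (v : String) (o : Option String) (d : String) :
    (if c then some v else o).getD d = if c then v else o.getD d := by
  split_ifs <;> rfl

theorem pvA_getD (e m : String) : get_required_permission e m
    = (pvEndpointPermissions.get? (e, m)).getD (pvScanA e m pvEndpointPermissions.items) := by
  rw [get_required_permission]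
  cases pvEndpointPermissions.get? (e, m) <;> rfl

set_option maxHeartbeats 2000000 in
theorem pvScanA_eval (e m : String) : pvScanA e m pvEntries =
    (
     if m = "GET" ∧ "/api/dlq/" = pvBaseEndpoint e then "read_all" else
     if m = "GET" ∧ "/api/dlq/task/" = pvBaseEndpoint e then "read_all" else
     if m = "GET" ∧ "/api/agent/" = pvBaseEndpoint e then "read_all" else
     if m = "PUT" ∧ "/api/agent/" = pvBaseEndpoint e then "assign" else
     if m = "DELETE" ∧ "/api/agent/" = pvBaseEndpoint e then "assign" else
     "read_all") := by
  have c01 : PySem.Str.isIn "<" "/api/task/create" = false := by decide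
  have c02 : PySem.Str.isIn "<" "/api/task/status" = false := by decide
  have c03 : PySem.Str.isIn "<" "/api/task/result" = false := by decide
  have c04 : PySem.Str.isIn "<" "/api/task/next" = false := by decide
  have c05 : PySem.Str.isIn "<" "/api/task/heartbeat" = false := by decide
  have c06 : PySem.Str.isIn "<" "/api/task/routing" = false := by decide
  have c07 : PySem.Str.isIn "<" "/api/dlq/list" = false := by decide
  have c08 : PySem.Str.isIn "<" "/api/dlq" = false := by decide
  have c09 : PySem.Str.isIn "<" "/api/dlq/replay" = false := by decide
  have c10 : PySem.Str.isIn "<" "/api/dlq/<dlq_id>" = true := by decide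
  have c11 : PySem.Str.isIn "<" "/api/dlq/task/<task_code>" = true := by decide
  have c12 : PySem.Str.isIn "<" "/api/agent/register" = false := by decide
  have c13 : PySem.Str.isIn "<" "/api/agent/list" = false := by decide
  have c14 : PySem.Str.isIn "<" "/api/agent/<agent_id>" = true := by decide
  have w10 : ((PySem.Str.split? "/api/dlq/<dlq_id>" "/<").getD []).headD "" ++ "/" = "/api/dlq/" := by decide
  have w11 : ((PySem.Str.split? "/api/dlq/task/<task_code>" "/<").getD []).headD "" ++ "/" = "/api/dlq/task/" := by decide
  have w14 : ((PySem.Str.split? "/api/agent/<agent_id>" "/<").getD []).headD "" ++ "/" = "/api/agent/" := by decide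
  simp only [pvEntries, pvScanA, c01, c02, c03, c04, c05, c06, c07, c08, c09, c10, c11, c12,
    c13, c14, w10, w11, w14, Bool.false_and, Bool.true_and, Bool.false_eq_true, if_false,
    beq_iff_eq]
  split_ifs <;> first | rfl | simp_all

set_option maxHeartbeats 1000000 in
theorem pvA_eval (e m : String) : get_required_permission e m =
    (
     if "/api/task/create" = e ∧ "POST" = m then "create" else
     if "/api/task/status" = e ∧ "GET" = m then "read_all" else
     if "/api/task/result" = e ∧ "POST" = m then "report_result" else
     if "/api/task/next" = e ∧ "GET" = m then "read_all" else
     if "/api/task/heartbeat" = e ∧ "POST" = m then "read_all" else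
     if "/api/task/routing" = e ∧ "POST" = m then "read_all" else
     if "/api/dlq/list" = e ∧ "GET" = m then "read_all" else
     if "/api/dlq" = e ∧ "GET" = m then "read_all" else
     if "/api/dlq/replay" = e ∧ "POST" = m then "replay_dlq" else
     if "/api/dlq/<dlq_id>" = e ∧ "GET" = m then "read_all" else
     if "/api/dlq/task/<task_code>" = e ∧ "GET" = m then "read_all" else
     if "/api/agent/register" = e ∧ "POST" = m then "assign" else
     if "/api/agent/list" = e ∧ "GET" = m then "read_all" else
     if "/api/agent/<agent_id>" = e ∧ "GET" = m then "read_all" else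
     if "/api/agent/<agent_id>" = e ∧ "PUT" = m then "assign" else
     if "/api/agent/<agent_id>" = e ∧ "DELETE" = m then "assign" else
     if m = "GET" ∧ "/api/dlq/" = pvBaseEndpoint e then "read_all" else
     if m = "GET" ∧ "/api/dlq/task/" = pvBaseEndpoint e then "read_all" else
     if m = "GET" ∧ "/api/agent/" = pvBaseEndpoint e then "read_all" else
     if m = "PUT" ∧ "/api/agent/" = pvBaseEndpoint e then "assign" else
     if m = "DELETE" ∧ "/api/agent/" = pvBaseEndpoint e then "assign" else
     "read_all") := by
  have hnil : (PySem.Dict.mk ([] : List ((String × String) × String))).get? (e, m) = none := rfl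
  have hitems : pvEndpointPermissions.items = pvEntries := rfl
  rw [pvA_getD, hitems]
  rw [show pvEndpointPermissions.get? (e, m) = (PySem.Dict.mk pvEntries).get? (e, m) from rfl]
  rw [← pvScanA_eval e m]
  simp only [pvEntries, PySem.Dict.get?_mk_cons, Prod.mk.injEq, beq_iff_eq, hnil,
    pvGetD_ite, Option.getD_none]

set_option maxHeartbeats 1000000 in
theorem pvB_eval (e m : String) : get_required_permission_alt e m =
    (
     if m = "POST" ∧ pvMatches ["", "api", "task", "create"] (pvParts e) = true then "create" else
     if m = "GET" ∧ pvMatches ["", "api", "task", "status"] (pvParts e) = true then "read_all" else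
     if m = "POST" ∧ pvMatches ["", "api", "task", "result"] (pvParts e) = true then "report_result" else
     if m = "GET" ∧ pvMatches ["", "api", "task", "next"] (pvParts e) = true then "read_all" else
     if m = "POST" ∧ pvMatches ["", "api", "task", "heartbeat"] (pvParts e) = true then "read_all" else
     if m = "POST" ∧ pvMatches ["", "api", "task", "routing"] (pvParts e) = true then "read_all" else
     if m = "GET" ∧ pvMatches ["", "api", "dlq", "list"] (pvParts e) = true then "read_all" else
     if m = "GET" ∧ pvMatches ["", "api", "dlq"] (pvParts e) = true then "read_all" else
     if m = "POST" ∧ pvMatches ["", "api", "dlq", "replay"] (pvParts e) = true then "replay_dlq" else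
     if m = "GET" ∧ pvMatches ["", "api", "dlq", "<dlq_id>"] (pvParts e) = true then "read_all" else
     if m = "GET" ∧ pvMatches ["", "api", "dlq", "task", "<task_code>"] (pvParts e) = true then "read_all" else
     if m = "POST" ∧ pvMatches ["", "api", "agent", "register"] (pvParts e) = true then "assign" else
     if m = "GET" ∧ pvMatches ["", "api", "agent", "list"] (pvParts e) = true then "read_all" else
     if m = "GET" ∧ pvMatches ["", "api", "agent", "<agent_id>"] (pvParts e) = true then "read_all" else
     if m = "PUT" ∧ pvMatches ["", "api", "agent", "<agent_id>"] (pvParts e) = true then "assign" else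
     if m = "DELETE" ∧ pvMatches ["", "api", "agent", "<agent_id>"] (pvParts e) = true then "assign" else
     "read_all") := by
  have p01 : (PySem.Str.split? "/api/task/create" "/").getD [] = ["", "api", "task", "create"] := by decide
  have p02 : (PySem.Str.split? "/api/task/status" "/").getD [] = ["", "api", "task", "status"] := by decide
  have p03 : (PySem.Str.split? "/api/task/result" "/").getD [] = ["", "api", "task", "result"] := by decide
  have p04 : (PySem.Str.split? "/api/task/next" "/").getD [] = ["", "api", "task", "next"] := by decide
  have p05 : (PySem.Str.split? "/api/task/heartbeat" "/").getD [] = ["", "api", "task", "heartbeat"] := by decide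
  have p06 : (PySem.Str.split? "/api/task/routing" "/").getD [] = ["", "api", "task", "routing"] := by decide
  have p07 : (PySem.Str.split? "/api/dlq/list" "/").getD [] = ["", "api", "dlq", "list"] := by decide
  have p08 : (PySem.Str.split? "/api/dlq" "/").getD [] = ["", "api", "dlq"] := by decide
  have p09 : (PySem.Str.split? "/api/dlq/replay" "/").getD [] = ["", "api", "dlq", "replay"] := by decide
  have p10 : (PySem.Str.split? "/api/dlq/<dlq_id>" "/").getD [] = ["", "api", "dlq", "<dlq_id>"] := by decide
  have p11 : (PySem.Str.split? "/api/dlq/task/<task_code>" "/").getD [] = ["", "api", "dlq", "task", "<task_code>"] := by decide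
  have p12 : (PySem.Str.split? "/api/agent/register" "/").getD [] = ["", "api", "agent", "register"] := by decide
  have p13 : (PySem.Str.split? "/api/agent/list" "/").getD [] = ["", "api", "agent", "list"] := by decide
  have p14 : (PySem.Str.split? "/api/agent/<agent_id>" "/").getD [] = ["", "api", "agent", "<agent_id>"] := by decide
  rw [get_required_permission_alt]
  rw [show (PySem.Str.split? e "/").getD [] = pvParts e from rfl]
  simp only [pvEntries, pvScanAlt, p01, p02, p03, p04, p05, p06, p07, p08, p09, p10, p11,
    p12, p13, p14, Bool.and_eq_true, beq_iff_eq]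

theorem pvWild_iff1 (e : String) : ("/api/dlq/" = pvBaseEndpoint e) ↔ pvMatches ["", "api", "dlq", "<dlq_id>"] (pvParts e) = true := by
  have h1 : pvMatches ["", "api", "dlq", "<dlq_id>"] (pvParts e) = true ↔ ∃ x, pvParts e = ["", "api", "dlq"] ++ [x] := by
    have := pvMatches_wild ["", "api", "dlq"] "<dlq_id>" (pvParts e) (by decide) (by decide)
    simpa using this
  rw [h1, eq_comm]
  have h2 := pvBase_iff e ["", "api", "dlq"] (by decide) (by decide)
  rw [show String.ofList (List.intercalate ['/'] (List.map String.toList ["", "api", "dlq"]) ++ ['/']) = "/api/dlq/" from by decide] at h2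
  exact h2

theorem pvWild_iff2 (e : String) : ("/api/dlq/task/" = pvBaseEndpoint e) ↔ pvMatches ["", "api", "dlq", "task", "<task_code>"] (pvParts e) = true := by
  have h1 : pvMatches ["", "api", "dlq", "task", "<task_code>"] (pvParts e) = true ↔ ∃ x, pvParts e = ["", "api", "dlq", "task"] ++ [x] := by
    have := pvMatches_wild ["", "api", "dlq", "task"] "<task_code>" (pvParts e) (by decide) (by decide)
    simpa using this
  rw [h1, eq_comm]
  have h2 := pvBase_iff e ["", "api", "dlq", "task"] (by decide) (by decide)
  rw [show String.ofList (List.intercalate ['/'] (List.map String.toList ["", "api", "dlq", "task"]) ++ ['/']) = "/api/dlq/task/" from by decide] at h2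
  exact h2

theorem pvWild_iff3 (e : String) : ("/api/agent/" = pvBaseEndpoint e) ↔ pvMatches ["", "api", "agent", "<agent_id>"] (pvParts e) = true := by
  have h1 : pvMatches ["", "api", "agent", "<agent_id>"] (pvParts e) = true ↔ ∃ x, pvParts e = ["", "api", "agent"] ++ [x] := by
    have := pvMatches_wild ["", "api", "agent"] "<agent_id>" (pvParts e) (by decide) (by decide)
    simpa using this
  rw [h1, eq_comm]
  have h2 := pvBase_iff e ["", "api", "agent"] (by decide) (by decide)
  rw [show String.ofList (List.intercalate ['/'] (List.map String.toList ["", "api", "agent"]) ++ ['/']) = "/api/agent/" from by decide] at h2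
  exact h2

theorem pvCondFlip (k mi : String) (e m : String) :
    (k = e ∧ mi = m) ↔ (e = k ∧ m = mi) :=
  ⟨fun ⟨a, b⟩ => ⟨a.symm, b.symm⟩, fun ⟨a, b⟩ => ⟨a.symm, b.symm⟩⟩

theorem pvExactCond (k mi : String) (pat : List String) (e m : String)
    (hpat : (PySem.Str.split? k "/").getD [] = pat)
    (hp : ∀ p ∈ pat, PySem.Str.startswith p "<" = false) :
    (m = mi ∧ pvMatches pat (pvParts e) = true) ↔ (e = k ∧ m = mi) := by
  rw [pvMatches_exact pat _ hp]
  constructor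
  · rintro ⟨hm, hpp⟩
    refine ⟨pvSplit_inj e k ?_, hm⟩
    rw [show pvParts k = (PySem.Str.split? k "/").getD [] from rfl, hpat]
    exact hpp
  · rintro ⟨he, hm⟩
    subst he
    refine ⟨hm, ?_⟩
    rw [show pvParts e = (PySem.Str.split? e "/").getD [] from rfl, hpat]

set_option maxHeartbeats 4000000 in
theorem pvMain (e m : String) : get_required_permission e m = get_required_permission_alt e m := by
  rw [pvA_eval, pvB_eval]
  simp only [pvWild_iff1, pvWild_iff2, pvWild_iff3]
  simp only [pvCondFlip "/api/task/create" "POST", pvCondFlip "/api/task/status" "GET", pvCondFlip "/api/task/result" "POST", pvCondFlip "/api/task/next" "GET", pvCondFlip "/api/task/heartbeat" "POST", pvCondFlip "/api/task/routing" "POST", pvCondFlip "/api/dlq/list" "GET", pvCondFlip "/api/dlq" "GET", pvCondFlip "/api/dlq/replay" "POST", pvCondFlip "/api/dlq/<dlq_id>" "GET", pvCondFlip "/api/dlq/task/<task_code>" "GET", pvCondFlip "/api/agent/register" "POST", pvCondFlip "/api/agent/list" "GET", pvCondFlip "/api/agent/<agent_id>" "GET", pvCondFlip "/api/agent/<agent_id>"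 "PUT", pvCondFlip "/api/agent/<agent_id>" "DELETE"]
  simp only [pvExactCond "/api/task/create" "POST" ["", "api", "task", "create"] e m (by decide) (by decide),
    pvExactCond "/api/task/status" "GET" ["", "api", "task", "status"] e m (by decide) (by decide),
    pvExactCond "/api/task/result" "POST" ["", "api", "task", "result"] e m (by decide) (by decide),
    pvExactCond "/api/task/next" "GET" ["", "api", "task", "next"] e m (by decide) (by decide),
    pvExactCond "/api/task/heartbeat" "POST" ["", "api", "task", "heartbeat"] e m (by decide) (by decide),
    pvExactCond "/api/task/routing" "POST" ["", "api", "task", "routing"] e m (by decide) (by decide),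
    pvExactCond "/api/dlq/list" "GET" ["", "api", "dlq", "list"] e m (by decide) (by decide),
    pvExactCond "/api/dlq" "GET" ["", "api", "dlq"] e m (by decide) (by decide),
    pvExactCond "/api/dlq/replay" "POST" ["", "api", "dlq", "replay"] e m (by decide) (by decide),
    pvExactCond "/api/agent/register" "POST" ["", "api", "agent", "register"] e m (by decide) (by decide),
    pvExactCond "/api/agent/list" "GET" ["", "api", "agent", "list"] e m (by decide) (by decide)]
  by_cases h1 : e = "/api/task/create" ∧ m = "POST"
  · obtain ⟨he, hm⟩ := h1; subst he; subst hm; decide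
  by_cases h2 : e = "/api/task/status" ∧ m = "GET"
  · obtain ⟨he, hm⟩ := h2; subst he; subst hm; decide
  by_cases h3 : e = "/api/task/result" ∧ m = "POST"
  · obtain ⟨he, hm⟩ := h3; subst he; subst hm; decide
  by_cases h4 : e = "/api/task/next" ∧ m = "GET"
  · obtain ⟨he, hm⟩ := h4; subst he; subst hm; decide
  by_cases h5 : e = "/api/task/heartbeat" ∧ m = "POST"
  · obtain ⟨he, hm⟩ := h5; subst he; subst hm; decide
  by_cases h6 : e = "/api/task/routing" ∧ m = "POST"
  · obtain ⟨he, hm⟩ := h6; subst he; subst hm; decide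
  by_cases h7 : e = "/api/dlq/list" ∧ m = "GET"
  · obtain ⟨he, hm⟩ := h7; subst he; subst hm; decide
  by_cases h8 : e = "/api/dlq" ∧ m = "GET"
  · obtain ⟨he, hm⟩ := h8; subst he; subst hm; decide
  by_cases h9 : e = "/api/dlq/replay" ∧ m = "POST"
  · obtain ⟨he, hm⟩ := h9; subst he; subst hm; decide
  by_cases hW1 : m = "GET" ∧ pvMatches ["", "api", "dlq", "<dlq_id>"] (pvParts e) = true
  · obtain ⟨hm, hM⟩ := hW1
    by_cases he10 : e = "/api/dlq/<dlq_id>"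
    · subst he10; subst hm; decide
    · subst hm
      have n2 : ¬(e = "/api/task/status") := fun he => h2 ⟨he, rfl⟩
      have n4 : ¬(e = "/api/task/next") := fun he => h4 ⟨he, rfl⟩
      have n7 : ¬(e = "/api/dlq/list") := fun he => h7 ⟨he, rfl⟩
      have n8 : ¬(e = "/api/dlq") := fun he => h8 ⟨he, rfl⟩
      have n11 : ¬(e = "/api/dlq/task/<task_code>") := by intro he; rw [he] at hM; exact absurd hM (by decide)
      have n13 : ¬(e = "/api/agent/list") := by intro he; rw [he] at hM; exact absurd hM (by decide)
      have n14 : ¬(e = "/api/agent/<agent_id>") := by intro he; rw [he] at hM; exact absurd hM (by decide)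
      simp [hM, n2, n4, n7, n8, he10, n11, n13, n14]
  by_cases hW2 : m = "GET" ∧ pvMatches ["", "api", "dlq", "task", "<task_code>"] (pvParts e) = true
  · obtain ⟨hm, hM⟩ := hW2
    by_cases he11 : e = "/api/dlq/task/<task_code>"
    · subst he11; subst hm; decide
    · subst hm
      have n2 : ¬(e = "/api/task/status") := fun he => h2 ⟨he, rfl⟩
      have n4 : ¬(e = "/api/task/next") := fun he => h4 ⟨he, rfl⟩
      have n7 : ¬(e = "/api/dlq/list") := fun he => h7 ⟨he, rfl⟩
      have n8 : ¬(e = "/api/dlq") := fun he => h8 ⟨he, rfl⟩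
      have nM1 : ¬(pvMatches ["", "api", "dlq", "<dlq_id>"] (pvParts e) = true) := fun x => hW1 ⟨rfl, x⟩
      have n10 : ¬(e = "/api/dlq/<dlq_id>") := by intro he; rw [he] at hM; exact absurd hM (by decide)
      have n13 : ¬(e = "/api/agent/list") := by intro he; rw [he] at hM; exact absurd hM (by decide)
      have n14 : ¬(e = "/api/agent/<agent_id>") := by intro he; rw [he] at hM; exact absurd hM (by decide)
      simp [hM, n2, n4, n7, n8, n10, he11, n13, n14, nM1]
  by_cases h12 : e = "/api/agent/register" ∧ m = "POST"
  · obtain ⟨he, hm⟩ := h12; subst he; subst hm; decide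
  by_cases h13 : e = "/api/agent/list" ∧ m = "GET"
  · obtain ⟨he, hm⟩ := h13; subst he; subst hm; decide
  by_cases hW3 : m = "GET" ∧ pvMatches ["", "api", "agent", "<agent_id>"] (pvParts e) = true
  · obtain ⟨hm, hM⟩ := hW3
    by_cases he14 : e = "/api/agent/<agent_id>"
    · subst he14; subst hm; decide
    · subst hm
      have n2 : ¬(e = "/api/task/status") := fun he => h2 ⟨he, rfl⟩
      have n4 : ¬(e = "/api/task/next") := fun he => h4 ⟨he, rfl⟩
      have n7 : ¬(e = "/api/dlq/list") := fun he => h7 ⟨he, rfl⟩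
      have n8 : ¬(e = "/api/dlq") := fun he => h8 ⟨he, rfl⟩
      have nM1 : ¬(pvMatches ["", "api", "dlq", "<dlq_id>"] (pvParts e) = true) := fun x => hW1 ⟨rfl, x⟩
      have nM2 : ¬(pvMatches ["", "api", "dlq", "task", "<task_code>"] (pvParts e) = true) := fun x => hW2 ⟨rfl, x⟩
      have n10 : ¬(e = "/api/dlq/<dlq_id>") := by intro he; rw [he] at hM; exact absurd hM (by decide)
      have n11 : ¬(e = "/api/dlq/task/<task_code>") := by intro he; rw [he] at hM; exact absurd hM (by decide)
      have n13 : ¬(e = "/api/agent/list") := fun he => h13 ⟨he, rfl⟩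
      simp [hM, n2, n4, n7, n8, n10, n11, n13, he14, nM1, nM2]
  by_cases hW4 : m = "PUT" ∧ pvMatches ["", "api", "agent", "<agent_id>"] (pvParts e) = true
  · obtain ⟨hm, hM⟩ := hW4
    by_cases he14 : e = "/api/agent/<agent_id>"
    · subst he14; subst hm; decide
    · subst hm
      simp [hM, he14]
  by_cases hW5 : m = "DELETE" ∧ pvMatches ["", "api", "agent", "<agent_id>"] (pvParts e) = true
  · obtain ⟨hm, hM⟩ := hW5
    by_cases he14 : e = "/api/agent/<agent_id>"
    · subst he14; subst hm; decide
    · subst hm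
      simp [hM, he14]
  · have n10 : ¬(e = "/api/dlq/<dlq_id>" ∧ m = "GET") := by
      rintro ⟨he, hm⟩; exact hW1 ⟨hm, by rw [he]; decide⟩
    have n11 : ¬(e = "/api/dlq/task/<task_code>" ∧ m = "GET") := by
      rintro ⟨he, hm⟩; exact hW2 ⟨hm, by rw [he]; decide⟩
    have n14 : ¬(e = "/api/agent/<agent_id>" ∧ m = "GET") := by
      rintro ⟨he, hm⟩; exact hW3 ⟨hm, by rw [he]; decide⟩
    have n15 : ¬(e = "/api/agent/<agent_id>" ∧ m = "PUT") := by
      rintro ⟨he, hm⟩; exact hW4 ⟨hm, by rw [he]; decide⟩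
    have n16 : ¬(e = "/api/agent/<agent_id>" ∧ m = "DELETE") := by
      rintro ⟨he, hm⟩; exact hW5 ⟨hm, by rw [he]; decide⟩
    simp [h1, h2, h3, h4, h5, h6, h7, h8, h9, h12, h13, hW1, hW2, hW3, hW4, hW5,
      n10, n11, n14, n15, n16]

-- ===== VERDICT (by name: the statement is the Claim_ definition above) =====
theorem get_required_permission_spec : Claim_equal_get_required_permission := by
  intro endpoint method _
  exact pvMain endpoint method
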